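-- pv_equiv track=rewrite | github.com/w-uppenberg/main | ai-hackathon/main.py | validate_extra_rule
-- ===== SOURCE A (Python) =====
-- def validate_extra_rule(board):
--     "extract the main diagonal (position 0,0 to 8,8) and check if it contains all the numbers 1-9"
--     diagonal = [board[i][i] for i in range(len(board))]
--     if len(set(diagonal)) != len(diagonal):
--         return False
--     diagonal2 = [board[i][8-i] for i in range(len(board))]
--     if len(set(diagonal2)) != len(diagonal2):
--         return False
--
--     # Check adjacent numbers in diagonals
--     for i in range(len(board)-1):
--         if (board[i][i] == 3 or board[i][i] == 5) and (board[i+1][i+1] == 3 or board[i+1][i+1] == 5):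
--             return False
--         if (board[i][8-i] == 3 or board[i][8-i] == 5) and (board[i+1][8-i-1] == 3 or board[i+1][8-i-1] == 5):
--             return False
--
--     return True
-- ===== SOURCE B (Python) =====
-- def _check(diag):
--     """One linear pass over a diagonal: fail on a duplicate or on two
--     adjacent values that are both in {3, 5}."""
--     seen = set()
--     prev = None
--     for x in diag:
--         if x in seen:
--             return False
--         if prev is not None and prev in (3, 5) and x in (3, 5):
--             return False
--         seen.add(x)
--         prev = x
--     return True
--
--
-- def validate_extra_rule(board):
--     n = len(board)
--     if not _check([board[i][i] for i in range(n)]):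
--         return False
--     return _check([board[i][8 - i] for i in range(n)])
-- ===== Notes on version B (the rewrite author's own statement) =====
-- stated objective: alternative
-- what changed: A makes four separate passes (two set-length uniqueness tests plus an interleaved index loop re-reading the board for adjacency); B extracts each diagonal once and validates it with a single linear pass helper maintaining a seen-set and the previous element.
import Mathlib
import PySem

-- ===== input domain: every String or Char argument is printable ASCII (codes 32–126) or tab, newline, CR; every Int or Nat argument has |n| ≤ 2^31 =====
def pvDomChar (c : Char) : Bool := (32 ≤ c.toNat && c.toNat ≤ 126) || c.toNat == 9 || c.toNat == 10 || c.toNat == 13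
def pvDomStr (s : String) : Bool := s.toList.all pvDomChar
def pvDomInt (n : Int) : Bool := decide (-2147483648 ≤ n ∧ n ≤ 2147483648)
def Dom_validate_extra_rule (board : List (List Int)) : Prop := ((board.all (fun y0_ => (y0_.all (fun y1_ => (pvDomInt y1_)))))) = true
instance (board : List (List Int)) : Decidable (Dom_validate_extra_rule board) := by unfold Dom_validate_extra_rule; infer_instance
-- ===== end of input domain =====

-- B replaces A's two set-length uniqueness tests plus an interleaved index loop by one
-- linear-pass helper per diagonal (seen-set + previous element); equivalence of return values.

-- ===== PORT A =====
-- board[i][j]: outer index i comes from range(len(board)), always valid; inner index j may be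
-- negative (8-i), so Python wraparound/IndexError semantics via pyGetD (total form; Pre_ below
-- restricts to in-range accesses exactly where the Python returns).
def pvCellA (board : List (List Int)) (i : Nat) (j : Int) : Int :=
  PySem.List.pyGetD (board.getD i []) j 0

def validate_extra_rule (board : List (List Int)) : Bool :=
  let n := board.length
  let diagonal := (List.range n).map (fun i => pvCellA board i (i : Int))
  if (PySem.Set.ofList diagonal).length ≠ diagonal.length then false
  else
    let diagonal2 := (List.range n).map (fun i => pvCellA board i (8 - (i : Int)))
    if (PySem.Set.ofList diagonal2).length ≠ diagonal2.length then false
    else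
      -- 'for i in range(len(board)-1): if …: return False' = all indices pass both checks
      (List.range (n - 1)).all (fun i =>
        !( ((pvCellA board i (i : Int) == 3) || (pvCellA board i (i : Int) == 5)) &&
           ((pvCellA board (i+1) ((i : Int) + 1) == 3) || (pvCellA board (i+1) ((i : Int) + 1) == 5)) ) &&
        !( ((pvCellA board i (8 - (i : Int)) == 3) || (pvCellA board i (8 - (i : Int)) == 5)) &&
           ((pvCellA board (i+1) (8 - (i : Int) - 1) == 3) || (pvCellA board (i+1) (8 - (i : Int) - 1) == 5)) ))

-- ===== PORT B =====
def pvCellB (board : List (List Int)) (i : Nat) (j : Int) : Int :=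
  PySem.List.pyGetD (board.getD i []) j 0

def pvIs35 (x : Int) : Bool := (x == 3) || (x == 5)

-- the for-loop of _check: state = (seen, prev)
def pvCheckAux (seen : PySem.Set Int) (prev : Option Int) : List Int → Bool
  | [] => true
  | x :: xs =>
    if PySem.Set.contains seen x then false
    else
      match prev with
      | some p =>
        if pvIs35 p && pvIs35 x then false
        else pvCheckAux (PySem.Set.add seen x) (some x) xs
      | none => pvCheckAux (PySem.Set.add seen x) (some x) xs

def pvCheck (diag : List Int) : Bool := pvCheckAux PySem.Set.empty none diag

def validate_extra_rule_alt (board : List (List Int)) : Bool :=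
  let n := board.length
  if !(pvCheck ((List.range n).map (fun i => pvCellB board i (i : Int)))) then false
  else pvCheck ((List.range n).map (fun i => pvCellB board i (8 - (i : Int))))

-- ===== PRECONDITION & SPEC =====
-- Exactly the inputs on which the Python A returns: every main-diagonal access board[i][i]
-- is in range, and — only when the main diagonal has no duplicate, since A otherwise returns
-- False before building diagonal2 — every anti-diagonal access board[i][8-i] is in range.
def Pre_validate_extra_rule (board : List (List Int)) : Prop :=
  (∀ i, i < board.length → PySem.Raise.InRange (board.getD i []).length (i : Int)) ∧
  (((List.range board.length).map (fun i => (board.getD i []).getD i 0)).Nodup →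
    ∀ i, i < board.length → PySem.Raise.InRange (board.getD i []).length (8 - (i : Int)))

instance (board : List (List Int)) : Decidable (Pre_validate_extra_rule board) := by
  unfold Pre_validate_extra_rule; infer_instance

def pvWitness_validate_extra_rule : List (List Int) :=
  [[1,2,3,4,5,6,7,8,9],[2,3,4,5,6,7,8,9,1],[3,4,5,6,7,8,9,1,2],
   [4,5,6,7,8,9,1,2,3],[5,6,7,8,9,1,2,3,4],[6,7,8,9,1,2,3,4,5],
   [7,8,9,1,2,3,4,5,6],[8,9,1,2,3,4,5,6,7],[9,1,2,3,4,5,6,7,8]]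

def Spec_validate_extra_rule (board : List (List Int)) (out : Bool) : Prop := out = validate_extra_rule_alt board
instance (board : List (List Int)) (out : Bool) : Decidable (Spec_validate_extra_rule board out) := by unfold Spec_validate_extra_rule; infer_instance

-- ===== CLAIM (what is proved, stated in full; the proofs are below) =====
def Claim_equal_validate_extra_rule : Prop := ∀ (board : List (List Int)), Dom_validate_extra_rule board → Pre_validate_extra_rule board → Spec_validate_extra_rule board (validate_extra_rule board)

-- ===== LEMMAS AND PROOFS =====

theorem pvCellAB : pvCellA = pvCellB := rfl

-- the two independent passes B's single pass merges
def pvNoDupAux (seen : PySem.Set Int) : List Int → Bool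
  | [] => true
  | x :: xs =>
    if PySem.Set.contains seen x then false
    else pvNoDupAux (PySem.Set.add seen x) xs

def pvAdjAux (prev : Option Int) : List Int → Bool
  | [] => true
  | x :: xs =>
    match prev with
    | some p => if pvIs35 p && pvIs35 x then false else pvAdjAux (some x) xs
    | none => pvAdjAux (some x) xs

theorem pvCheckAux_split (l : List Int) : ∀ (s : PySem.Set Int) (p : Option Int),
    pvCheckAux s p l = (pvNoDupAux s l && pvAdjAux p l) := by
  induction l with
  | nil => intro s p; rfl
  | cons x xs ih =>
    intro s p
    simp only [pvCheckAux, pvNoDupAux, pvAdjAux]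
    by_cases hm : x ∈ s
    · simp [hm]
    · cases p with
      | none => simp [hm, ih]
      | some q =>
        cases hq : pvIs35 q <;> cases hx : pvIs35 x <;> simp [hm, hq, ih]

theorem pvFoldl_add_length_le (l : List Int) : ∀ (s : PySem.Set Int),
    (List.foldl PySem.Set.add s l).length ≤ s.length + l.length := by
  induction l with
  | nil => intro s; simp
  | cons x xs ih =>
    intro s
    simp only [List.foldl_cons, List.length_cons]
    refine le_trans (ih _) ?_
    have : (PySem.Set.add s x).length ≤ s.length + 1 := by
      rw [PySem.Set.add_eq_ite]
      split_ifs <;> simp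
    omega

theorem pvNoDupAux_eq_len (l : List Int) : ∀ (s : PySem.Set Int),
    pvNoDupAux s l = ((List.foldl PySem.Set.add s l).length == s.length + l.length) := by
  induction l with
  | nil => intro s; simp [pvNoDupAux]
  | cons x xs ih =>
    intro s
    simp only [pvNoDupAux, List.foldl_cons, List.length_cons]
    by_cases h : x ∈ s
    · have hc : PySem.Set.contains s x = true := by simp [h]
      rw [if_pos hc, PySem.Set.add_of_mem h]
      have hle := pvFoldl_add_length_le xs s
      refine Eq.symm ?_
      rw [beq_eq_false_iff_ne]
      omega
    · have hc : ¬ (PySem.Set.contains s x = true) := by simp [h]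
      rw [if_neg hc, ih (PySem.Set.add s x), PySem.Set.add_of_not_mem h]
      have hl : (s ++ [x]).length + xs.length = s.length + (xs.length + 1) := by
        simp; omega
      rw [hl]

theorem pvNoDupAux_ofList (d : List Int) :
    pvNoDupAux PySem.Set.empty d = ((PySem.Set.ofList d).length == d.length) := by
  rw [pvNoDupAux_eq_len, PySem.Set.ofList_eq_foldl]
  simp [PySem.Set.empty]

theorem pvAll_and {α : Type} (l : List α) (f g : α → Bool) :
    (l.all (fun x => f x && g x)) = (l.all f && l.all g) := by
  induction l with
  | nil => rfl
  | cons x xs ih =>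
    simp only [List.all_cons, ih]
    cases f x <;> cases g x <;> cases xs.all f <;> cases xs.all g <;> rfl

theorem pvAll_congr {α : Type} (l : List α) (f g : α → Bool)
    (h : ∀ x ∈ l, f x = g x) : l.all f = l.all g := by
  induction l with
  | nil => rfl
  | cons x xs ih =>
    simp only [List.all_cons, h x (by simp), ih (fun y hy => h y (by simp [hy]))]

theorem pvAdjAux_none_cons (x : Int) (xs : List Int) :
    pvAdjAux none (x :: xs) = pvAdjAux (some x) xs := rfl

theorem pvAdjIdx : ∀ (d : List Int),
    (List.range (d.length - 1)).all
      (fun i => !(pvIs35 (d.getD i 0) && pvIs35 (d.getD (i+1) 0))) = pvAdjAux none d := by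
  intro d
  induction d with
  | nil => rfl
  | cons x t ih =>
    cases t with
    | nil => rfl
    | cons y t' =>
      have hlen : (x :: y :: t').length - 1 = ((y :: t').length - 1) + 1 := by simp
      rw [hlen, List.range_succ_eq_map]
      simp only [List.all_cons, List.all_map, Function.comp_def]
      have hb : ((List.range ((y :: t').length - 1)).all
          (fun i => !(pvIs35 ((x :: y :: t').getD (Nat.succ i) 0) &&
                      pvIs35 ((x :: y :: t').getD (Nat.succ i + 1) 0)))) =
          pvAdjAux none (y :: t') := by
        rw [← ih]
        exact pvAll_congr _ _ _ (fun i _ => rfl)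
      rw [hb, pvAdjAux_none_cons, pvAdjAux_none_cons]
      show (!(pvIs35 x && pvIs35 y) && pvAdjAux (some y) t') =
        (if pvIs35 x && pvIs35 y then false else pvAdjAux (some y) t')
      cases h : (pvIs35 x && pvIs35 y) <;> simp

theorem pvGetD_map_range {α : Type} [Inhabited α] (f : Nat → α) (n i : Nat) (hi : i < n) (d : α) :
    ((List.range n).map f).getD i d = f i := by
  rw [List.getD_eq_getElem?_getD]
  simp [hi]

-- A's adjacency loop over indices = pvAdjAux over the extracted diagonal
theorem pvLoop_eq_adj (n : Nat) (cell : Nat → Int) :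
    (List.range (n - 1)).all (fun i => !(pvIs35 (cell i) && pvIs35 (cell (i+1)))) =
    pvAdjAux none ((List.range n).map cell) := by
  have hlen : ((List.range n).map cell).length = n := by simp
  rw [← pvAdjIdx ((List.range n).map cell), hlen]
  apply pvAll_congr
  intro i hi
  have hin : i < n - 1 := List.mem_range.1 hi
  rw [pvGetD_map_range cell n i (by omega) 0, pvGetD_map_range cell n (i+1) (by omega) 0]

theorem pvB_eq (board : List (List Int)) :
    validate_extra_rule_alt board =
      ((pvNoDupAux PySem.Set.empty ((List.range board.length).map (fun i => pvCellA board i (i : Int))) &&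
        pvAdjAux none ((List.range board.length).map (fun i => pvCellA board i (i : Int)))) &&
       (pvNoDupAux PySem.Set.empty ((List.range board.length).map (fun i => pvCellA board i (8 - (i : Int)))) &&
        pvAdjAux none ((List.range board.length).map (fun i => pvCellA board i (8 - (i : Int)))))) := by
  simp only [validate_extra_rule_alt, pvCheck, pvCheckAux_split, ← pvCellAB]
  cases (pvNoDupAux PySem.Set.empty ((List.range board.length).map (fun i => pvCellA board i (i : Int))) &&
         pvAdjAux none ((List.range board.length).map (fun i => pvCellA board i (i : Int)))) <;> simp

-- ===== VERDICT (by name: the statement is the Claim_ definition above) =====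
theorem validate_extra_rule_spec : Claim_equal_validate_extra_rule := by
  intro board _ _
  unfold Spec_validate_extra_rule
  rw [pvB_eq]
  unfold validate_extra_rule
  set d1 := (List.range board.length).map (fun i => pvCellA board i (i : Int)) with hd1
  set d2 := (List.range board.length).map (fun i => pvCellA board i (8 - (i : Int))) with hd2
  by_cases h1 : (PySem.Set.ofList d1).length = d1.length
  · have hu1 : pvNoDupAux PySem.Set.empty d1 = true := by
      rw [pvNoDupAux_ofList, h1]; simp
    by_cases h2 : (PySem.Set.ofList d2).length = d2.length
    · have hu2 : pvNoDupAux PySem.Set.empty d2 = true := by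
        rw [pvNoDupAux_ofList, h2]; simp
      rw [if_neg (not_not_intro h1), if_neg (not_not_intro h2), hu1, hu2,
        Bool.true_and, Bool.true_and, pvAll_and]
      have e1 : (List.range (board.length - 1)).all
          (fun i => !( ((pvCellA board i (i : Int) == 3) || (pvCellA board i (i : Int) == 5)) &&
             ((pvCellA board (i+1) ((i : Int) + 1) == 3) || (pvCellA board (i+1) ((i : Int) + 1) == 5)) )) =
          pvAdjAux none d1 := by
        rw [hd1, ← pvLoop_eq_adj board.length (fun i => pvCellA board i (i : Int))]
        apply pvAll_congr
        intro i _
        have hc : ((i : Int) + 1) = (((i + 1 : Nat)) : Int) := by push_cast; ring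
        rw [hc]
        rfl
      have e2 : (List.range (board.length - 1)).all
          (fun i => !( ((pvCellA board i (8 - (i : Int)) == 3) || (pvCellA board i (8 - (i : Int)) == 5)) &&
             ((pvCellA board (i+1) (8 - (i : Int) - 1) == 3) || (pvCellA board (i+1) (8 - (i : Int) - 1) == 5)) )) =
          pvAdjAux none d2 := by
        rw [hd2, ← pvLoop_eq_adj board.length (fun i => pvCellA board i (8 - (i : Int)))]
        apply pvAll_congr
        intro i _
        have hc : (8 - (i : Int) - 1) = (8 - (((i + 1 : Nat)) : Int)) := by push_cast; ring
        rw [hc]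
        rfl
      rw [e1, e2]
    · have hu2 : pvNoDupAux PySem.Set.empty d2 = false := by
        rw [pvNoDupAux_ofList]
        simp [h2]
      rw [if_neg (not_not_intro h1), if_pos h2, hu2]
      simp
  · have hu1 : pvNoDupAux PySem.Set.empty d1 = false := by
      rw [pvNoDupAux_ofList]
      simp [h1]
    rw [if_pos h1, hu1]
    simp
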